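-- pv_equiv track=rewrite | github.com/facebook/sapling | mercurial/mdiff.py | splitnewlines
-- ===== SOURCE A (Python) =====
-- def splitnewlines(text, keepends=False):
--     '''like str.splitlines, but only split on newlines.'''
--     i = 0
--     lines = []
--     while True:
--         n = text.find('\n', i)
--         if n == -1:
--             last = text[i:]
--             if last:
--                 lines.append(last)
--             return lines
--         lines.append(text[i:keepends and n+1 or n])
--         i = n + 1
-- ===== SOURCE B (Python) =====
-- def splitnewlines(text, keepends=False):
--     '''like str.splitlines, but only split on newlines.'''
--     parts = text.split('\n')
--     ended = bool(parts) and parts[-1] == ''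
--     if ended:
--         parts.pop()
--     if not keepends:
--         return parts
--     if ended:
--         return [p + '\n' for p in parts]
--     return [p + '\n' for p in parts[:-1]] + parts[-1:]
-- ===== Notes on version B (the rewrite author's own statement) =====
-- stated objective: idiomatic
-- what changed: Replaced the manual find-and-slice loop with a single str.split pass on the newline character, popping the trailing empty piece and, for keepends, reattaching a newline to each newline-terminated part.
import Mathlib
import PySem

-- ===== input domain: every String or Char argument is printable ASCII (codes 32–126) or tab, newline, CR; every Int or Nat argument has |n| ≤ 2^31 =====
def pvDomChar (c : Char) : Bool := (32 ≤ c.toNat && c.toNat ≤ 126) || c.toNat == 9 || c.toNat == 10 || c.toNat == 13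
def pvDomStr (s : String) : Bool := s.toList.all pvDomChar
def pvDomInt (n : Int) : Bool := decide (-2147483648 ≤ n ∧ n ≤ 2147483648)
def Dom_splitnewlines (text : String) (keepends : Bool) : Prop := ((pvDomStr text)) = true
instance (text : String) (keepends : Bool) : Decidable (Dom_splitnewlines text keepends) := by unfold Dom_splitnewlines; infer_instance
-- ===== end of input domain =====

-- B replaces A's manual find()-and-slice loop by one split('\n') pass with a trailing-empty pop
-- and keepends reattachment (idiomatic; same O(n) cost).


-- ===== PORT A =====
-- A's while-loop: n = text.find('\n', i); append text[i:keepends and n+1 or n]; i = n+1.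
-- Ported on the remaining suffix s = text[i:] (text.find('\n', i) = i + find of the suffix,
-- text[i:j] = take (j-i) of the suffix), so 'i = n+1' becomes dropping n+1 chars; step for step
-- the same computation.  'keepends and n+1 or n' is n+1 when keepends else n (n ≥ 0 here).
def splitnewlinesA (keepends : Bool) (s : List Char) : List (List Char) :=
  let n := PySem.Chars.find s ['\n']
  if _h : n = -1 then
    if s.isEmpty then [] else [s]
  else
    s.take (if keepends then n.toNat + 1 else n.toNat) ::
      splitnewlinesA keepends (s.drop (n.toNat + 1))
termination_by s.length
decreasing_by
  have hne : s ≠ [] := by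
    intro hnil
    subst hnil
    exact _h rfl
  have : 0 < s.length := List.length_pos_iff.mpr hne
  simp only [List.length_drop]
  omega

def splitnewlines (text : String) (keepends : Bool) : List String :=
  (splitnewlinesA keepends text.toList).map String.mk

-- ===== PORT B =====
-- Source B on char lists: parts = text.split('\n'); pop a trailing empty part; if keepends,
-- reattach '\n' ('parts[:-1]' ported as dropLast, 'parts[-1:]' as the getLast? match — exact).
def splitnewlinesAltCore (s : List Char) (keepends : Bool) : List (List Char) :=
  let parts := PySem.Chars.splitOn s ['\n']
  let ended := !parts.isEmpty && (parts.getLast? == some [])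
  let parts := if ended then parts.dropLast else parts
  if !keepends then parts
  else if ended then parts.map (fun p => p ++ ['\n'])
  else parts.dropLast.map (fun p => p ++ ['\n']) ++
    (match parts.getLast? with | some l => [l] | none => [])

def splitnewlines_alt (text : String) (keepends : Bool) : List String :=
  (splitnewlinesAltCore text.toList keepends).map String.mk

-- ===== PRECONDITION & SPEC =====
def Spec_splitnewlines (text : String) (keepends : Bool) (out : List String) : Prop := out = splitnewlines_alt text keepends
instance (text : String) (keepends : Bool) (out : List String) : Decidable (Spec_splitnewlines text keepends out) := by unfold Spec_splitnewlines; infer_instance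

-- ===== CLAIM (what is proved, stated in full; the proofs are below) =====
def Claim_equal_splitnewlines : Prop := ∀ (text : String) (keepends : Bool), Dom_splitnewlines text keepends → Spec_splitnewlines text keepends (splitnewlines text keepends)

-- ===== LEMMAS AND PROOFS =====

-- Structural form of split-on-'\n' (proof-only; neither port computes with it).
def splitNL : List Char → List (List Char)
  | [] => [[]]
  | c :: s => if c = '\n' then [] :: splitNL s else (splitNL s).modifyHead (c :: ·)

theorem splitNL_ne_nil (s : List Char) : splitNL s ≠ [] := by
  cases s with
  | nil => simp [splitNL]
  | cons c t =>
    simp only [splitNL]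
    split
    · simp
    · simp [List.modifyHead_eq_nil_iff, splitNL_ne_nil t]

theorem modifyHead_id' (l : List (List Char)) : l.modifyHead (fun x => x) = l := by
  cases l <;> simp [List.modifyHead]

theorem go_spec : ∀ (fuel : Nat) (l cur : List Char) (acc : List (List Char)),
    l.length < fuel →
    PySem.Chars.splitOn.go ['\n'] fuel l cur acc
      = acc.reverse ++ (splitNL l).modifyHead (cur.reverse ++ ·) := by
  intro fuel
  induction fuel with
  | zero => intro l cur acc h; omega
  | succ f ih =>
    intro l cur acc h
    cases l with
    | nil =>
      simp [PySem.Chars.splitOn.go, splitNL]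
    | cons c rest =>
      by_cases hc : c = '\n'
      · subst hc
        have hpre : List.isPrefixOf ['\n'] ('\n' :: rest) = true := by
          simp [List.isPrefixOf]
        rw [PySem.Chars.splitOn.go]
        simp only [hpre, if_pos]
        rw [ih _ _ _ (by simp at h ⊢; omega)]
        simp [splitNL, modifyHead_id']
      · have hpre : List.isPrefixOf ['\n'] (c :: rest) = false := by
          simp [List.isPrefixOf]
          exact fun hh => (hc hh.symm).elim
        rw [PySem.Chars.splitOn.go]
        simp only [hpre, Bool.false_eq_true, if_false]
        rw [ih _ _ _ (by simp at h ⊢; omega)]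
        simp only [splitNL, if_neg hc]
        obtain ⟨p, t, hpt⟩ : ∃ p t, splitNL rest = p :: t := by
          cases hsp : splitNL rest with
          | nil => exact absurd hsp (splitNL_ne_nil rest)
          | cons p t => exact ⟨p, t, rfl⟩
        simp [hpt, List.modifyHead]

theorem splitOn_eq_splitNL (s : List Char) :
    PySem.Chars.splitOn s ['\n'] = splitNL s := by
  unfold PySem.Chars.splitOn
  rw [go_spec (s.length + 1) s [] [] (by omega)]
  simp [modifyHead_id']

-- find on '\n', structurally
theorem findgo_shift : ∀ (l : List Char) (k : Nat),
    PySem.Chars.find.go ['\n'] l k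
      = if PySem.Chars.find l ['\n'] = -1 then -1 else PySem.Chars.find l ['\n'] + k := by
  intro l
  induction l with
  | nil => intro k; simp [PySem.Chars.find, PySem.Chars.find.go]
  | cons c t ih =>
    intro k
    by_cases hc : c = '\n'
    · subst hc
      have hpre : List.isPrefixOf ['\n'] ('\n' :: t) = true := by simp [List.isPrefixOf]
      simp [PySem.Chars.find, PySem.Chars.find.go, hpre]
    · have hpre : List.isPrefixOf ['\n'] (c :: t) = false := by
        simp [List.isPrefixOf]; exact fun hh => (hc hh.symm).elim
      have hbase : PySem.Chars.find (c :: t) ['\n']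
          = if PySem.Chars.find t ['\n'] = -1 then -1 else PySem.Chars.find t ['\n'] + 1 := by
        show PySem.Chars.find.go ['\n'] (c :: t) 0 = _
        rw [PySem.Chars.find.go]
        simp only [hpre, Bool.false_eq_true, if_false]
        rw [ih 1]
        norm_num
      show PySem.Chars.find.go ['\n'] (c :: t) k = _
      rw [PySem.Chars.find.go]
      simp only [hpre, Bool.false_eq_true, if_false]
      rw [ih (k + 1), hbase]
      have hge : -1 ≤ PySem.Chars.find t ['\n'] := PySem.Chars.neg_one_le_find t ['\n']
      by_cases hm : PySem.Chars.find t ['\n'] = -1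
      · simp [hm]
      · have : 0 ≤ PySem.Chars.find t ['\n'] := by omega
        simp only [hm, if_false]
        have h1 : ¬ PySem.Chars.find t ['\n'] + 1 = -1 := by omega
        simp [h1]
        push_cast
        ring

theorem find_nil_nl : PySem.Chars.find [] ['\n'] = -1 := by
  simp [PySem.Chars.find, PySem.Chars.find.go]

theorem find_cons_nl (c : Char) (s : List Char) :
    PySem.Chars.find (c :: s) ['\n']
      = if c = '\n' then 0
        else if PySem.Chars.find s ['\n'] = -1 then -1 else PySem.Chars.find s ['\n'] + 1 := by
  by_cases hc : c = '\n'
  · subst hc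
    have hpre : List.isPrefixOf ['\n'] ('\n' :: s) = true := by simp [List.isPrefixOf]
    simp [PySem.Chars.find, PySem.Chars.find.go, hpre]
  · have hpre : List.isPrefixOf ['\n'] (c :: s) = false := by
      simp [List.isPrefixOf]; exact fun hh => (hc hh.symm).elim
    show PySem.Chars.find.go ['\n'] (c :: s) 0 = _
    rw [PySem.Chars.find.go]
    simp only [hpre, Bool.false_eq_true, if_false]
    rw [findgo_shift s 1]
    norm_num [hc]

theorem find_eq_neg_one_iff_not_mem (s : List Char) :
    PySem.Chars.find s ['\n'] = -1 ↔ '\n' ∉ s := by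
  induction s with
  | nil => simp [find_nil_nl]
  | cons c t ih =>
    rw [find_cons_nl]
    by_cases hc : c = '\n'
    · subst hc; simp
    · have hge : -1 ≤ PySem.Chars.find t ['\n'] := PySem.Chars.neg_one_le_find t ['\n']
      by_cases hm : PySem.Chars.find t ['\n'] = -1
      · simp [hc, hm, ih.mp hm, Ne.symm hc]
      · have h1 : ¬ PySem.Chars.find t ['\n'] + 1 = -1 := by omega
        have hmem : '\n' ∈ t := by
          by_contra hn
          exact hm (ih.mpr hn)
        simp [if_neg hc, if_neg hm, h1, hmem]

theorem splitNL_of_not_mem (s : List Char) (h : '\n' ∉ s) : splitNL s = [s] := by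
  induction s with
  | nil => simp [splitNL]
  | cons c t ih =>
    simp only [List.mem_cons, not_or] at h
    simp [splitNL, Ne.symm h.1, ih h.2, List.modifyHead]

theorem two_le_length_splitNL (s : List Char) (h : '\n' ∈ s) :
    2 ≤ (splitNL s).length := by
  induction s with
  | nil => simp at h
  | cons c t ih =>
    simp only [splitNL]
    by_cases hc : c = '\n'
    · simp only [if_pos hc, List.length_cons]
      have := splitNL_ne_nil t
      have : 0 < (splitNL t).length := List.length_pos_iff.mpr this
      omega
    · have ht : '\n' ∈ t := by
        rcases List.mem_cons.mp h with h | h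
        · exact absurd h.symm hc
        · exact h
      simp only [if_neg hc, List.length_modifyHead]
      exact ih ht

-- unfolding equations for splitnewlinesA
theorem splitA_nil (k : Bool) : splitnewlinesA k [] = [] := by
  rw [splitnewlinesA]
  simp [find_nil_nl]

theorem splitA_cons_nl (k : Bool) (s : List Char) :
    splitnewlinesA k ('\n' :: s) = (if k then ['\n'] else []) :: splitnewlinesA k s := by
  rw [splitnewlinesA]
  have hf : PySem.Chars.find ('\n' :: s) ['\n'] = 0 := by simp [find_cons_nl]
  simp only [hf]
  cases k <;> norm_num

theorem splitA_cons_nomem (k : Bool) (c : Char) (s : List Char) (hc : c ≠ '\n')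
    (h : PySem.Chars.find s ['\n'] = -1) :
    splitnewlinesA k (c :: s) = [c :: s] := by
  rw [splitnewlinesA]
  have hf : PySem.Chars.find (c :: s) ['\n'] = -1 := by
    rw [find_cons_nl]; simp [hc, h]
  simp [hf]

theorem splitA_cons_mem (k : Bool) (c : Char) (s : List Char) (hc : c ≠ '\n')
    (h : ¬ PySem.Chars.find s ['\n'] = -1) :
    splitnewlinesA k (c :: s) = (splitnewlinesA k s).modifyHead (c :: ·) := by
  have hge : -1 ≤ PySem.Chars.find s ['\n'] := PySem.Chars.neg_one_le_find s ['\n']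
  have h0 : 0 ≤ PySem.Chars.find s ['\n'] := by omega
  set n := PySem.Chars.find s ['\n'] with hn
  have hf : PySem.Chars.find (c :: s) ['\n'] = n + 1 := by
    rw [find_cons_nl, if_neg hc, ← hn, if_neg h]
  have h1 : ¬ (n + 1 = -1) := by omega
  conv_lhs => rw [splitnewlinesA]
  simp only [hf, h1, dif_neg, not_false_iff]
  conv_rhs => rw [splitnewlinesA]
  simp only [← hn, h, dif_neg, not_false_iff]
  have htn : (n + 1).toNat = n.toNat + 1 := by omega
  rw [htn]
  simp only [List.modifyHead]
  cases k <;> simp [List.take_succ_cons, List.drop_succ_cons]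

-- the central lemma: A's loop output = B's assembly, on char lists
theorem core_eq (k : Bool) (s : List Char) :
    splitnewlinesA k s = splitnewlinesAltCore s k := by
  induction s with
  | nil =>
    rw [splitA_nil]
    cases k <;> simp [splitnewlinesAltCore, splitOn_eq_splitNL, splitNL]
  | cons c t ih =>
    by_cases hc : c = '\n'
    · subst hc
      rw [splitA_cons_nl, ih]
      obtain ⟨p, r, hpr⟩ : ∃ p r, splitNL t = p :: r := by
        cases hsp : splitNL t with
        | nil => exact absurd hsp (splitNL_ne_nil t)
        | cons p r => exact ⟨p, r, rfl⟩
      simp only [splitnewlinesAltCore, splitOn_eq_splitNL, splitNL, if_pos rfl, hpr]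
      by_cases he : (p :: r).getLast? = some ([] : List Char)
      · simp only [List.isEmpty_cons, Bool.not_false, Bool.true_and,
          List.getLast?_cons_cons, he, beq_self_eq_true]
        have he' : ([] :: p :: r).getLast? = some ([] : List Char) := by
          simp [List.getLast?_cons_cons, he]
        cases k <;> simp [he, he', List.dropLast_cons₂]
      · have hbe : ((p :: r).getLast? == some ([] : List Char)) = false := by
          simp [he]
        have hbe' : (([] :: p :: r).getLast? == some ([] : List Char)) = false := by
          simp [List.getLast?_cons_cons, he]
        cases k <;>
          simp [hbe, hbe', List.dropLast_cons₂, List.getLast?_cons_cons]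
    · by_cases hm : PySem.Chars.find t ['\n'] = -1
      · have hnm : '\n' ∉ t := (find_eq_neg_one_iff_not_mem t).mp hm
        have hnm' : '\n' ∉ c :: t := by
          simp [List.mem_cons, Ne.symm hc, hnm]
        rw [splitA_cons_nomem k c t hc hm]
        simp only [splitnewlinesAltCore, splitOn_eq_splitNL, splitNL_of_not_mem _ hnm']
        have hlast : ([c :: t] : List (List Char)).getLast? = some (c :: t) := rfl
        cases k <;> simp [hlast]
      · have hmem : '\n' ∈ t := by
          by_contra hn
          exact hm ((find_eq_neg_one_iff_not_mem t).mpr hn)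
        rw [splitA_cons_mem k c t hc hm, ih]
        obtain ⟨p, q, r, hpr⟩ : ∃ p q r, splitNL t = p :: q :: r := by
          have h2 := two_le_length_splitNL t hmem
          cases hsp : splitNL t with
          | nil => simp [hsp] at h2
          | cons p u =>
            cases u with
            | nil => simp [hsp] at h2
            | cons q r => exact ⟨p, q, r, rfl⟩
        simp only [splitnewlinesAltCore, splitOn_eq_splitNL, splitNL, if_neg hc, hpr,
          List.modifyHead]
        by_cases he : (q :: r).getLast? = some ([] : List Char)
        · have he1 : ((p :: q :: r).getLast? == some ([] : List Char)) = true := by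
            simp [List.getLast?_cons_cons, he]
          have he2 : (((c :: p) :: q :: r).getLast? == some ([] : List Char)) = true := by
            simp [List.getLast?_cons_cons, he]
          cases k <;> simp [he, he1, he2, List.dropLast_cons₂, List.modifyHead]
        · have he1 : ((p :: q :: r).getLast? == some ([] : List Char)) = false := by
            simp [List.getLast?_cons_cons, he]
          have he2 : (((c :: p) :: q :: r).getLast? == some ([] : List Char)) = false := by
            simp [List.getLast?_cons_cons, he]
          cases k <;>
            simp [he, he1, he2, List.dropLast_cons₂, List.modifyHead, List.getLast?_cons_cons]

-- ===== VERDICT (by name: the statement is the Claim_ definition above) =====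
theorem splitnewlines_spec : Claim_equal_splitnewlines := by
  intro text keepends _
  unfold Spec_splitnewlines splitnewlines splitnewlines_alt
  rw [core_eq]
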